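-- pv_equiv track=rewrite | github.com/OohpiEr/FIT3155-S1-2022 | Assignment 1/ref/modified_BoyerMoore copy (2).py | good_suffix
-- ===== SOURCE A (Python) =====
-- def good_suffix(pattern: str) -> list:
--     """
--     Good Suffix Rule for Boyer Moore algorithm.
--
--
--     :param pattern: the pattern string
--
--     :returns: the good suffix array
--     """
--     m = len(pattern)
--
--     # get reversed z array
--     reversed_z_arr = get_reversed_z_arr(pattern)
--
--     # initialize good suffix array
--     good_suffix_arr = [[] for _ in range(0, m + 1)]
--
--     # fill in good suffix array
--     for p in range(m-2, -1, -1):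
--         j = m - reversed_z_arr[p]
--         good_suffix_arr[j].append(p + 1)
--
--     for list_i in good_suffix_arr:
--         if not list_i:
--             list_i.append(0)
--
--     return good_suffix_arr
--
-- def z_algo(string: str) -> list:
--     """
--     z-algorithm for pattern matching
--
--     :param string: a string
--
--     :returns: the z array
--     """
--     assert len(string) != 0
--
--     # initialize z array
--     z_arr = [0 for _ in range(len(string))]
--
--     # length of string stored in first cell
--     z_arr[0] = n = len(string)
--
--     l, r, k = 0, 0, 0
--     for i in range(1, n):
--
--         # CASE 1: i>R (i outside box or no box)
--         # calculate Z[i] naively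
--         if i > r:
--             l, r = i, i
--
--             # compare
--             while r < n and string[r - l] == string[r]:
--                 r += 1
--             z_arr[i] = r - l
--             r -= 1
--
--         # CASE 2: i<=R (i inside box)
--         else:
--             # k = i-L so k corresponds to number which
--             # matches in [L,R] interval.
--             k = i - l
--
--             # CASE 2a: Z[k] < remaining
--             # Z[i] equal to Z[k]
--             if z_arr[k] < r - i + 1:
--                 z_arr[i] = z_arr[k]
--
--             # CASE 2b: z[k] > remaining
--             # z[i] = remaining
--             elif z_arr[k] > r - i + 1:
--                 z_arr[i] = r - i + 1
--
--             # CASE 2c: Z[k] = remaining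
--             # compare string[r + 1 ... r + n]
--             elif z_arr[k] == r - i + 1:
--                 l = i
--                 while r < n and string[r - l] == string[r]:
--                     r += 1
--                 z_arr[i] = r - l
--                 r -= 1
--     return z_arr
--
-- def get_reversed_z_arr(string: str) -> list:
--     """
--     Returns a reversed z array for the good suffix rule.
--
--     :param string: the pattern string to preprocess for good suffix
--
--     :returns: a reversed z array.
--
--     :complexity: O(3m) where m is the length of the string
--     """
--     return z_algo(string[::-1])[::-1]
-- ===== SOURCE B (Python) =====
-- def good_suffix(pattern: str) -> list:
--     """Good Suffix table, computed by direct per-position suffix matching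
--     (no Z-algorithm): simpler, quadratic instead of linear."""
--     m = len(pattern)
--     buckets = [[] for _ in range(m + 1)]
--     for p in range(m - 2, -1, -1):
--         L = 0
--         while L <= p and pattern[m - 1 - L] == pattern[p - L]:
--             L += 1
--         buckets[m - L].append(p + 1)
--     for b in buckets:
--         if not b:
--             b.append(0)
--     return buckets
-- ===== Notes on version B (the rewrite author's own statement) =====
-- stated objective: simpler
-- what changed: Replaces the Z-algorithm helpers (z_algo on the reversed pattern plus two reversals) by a direct per-position loop that grows the longest suffix-of-pattern match ending at each position, filling the buckets in the same descending order.
import Mathlib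
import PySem

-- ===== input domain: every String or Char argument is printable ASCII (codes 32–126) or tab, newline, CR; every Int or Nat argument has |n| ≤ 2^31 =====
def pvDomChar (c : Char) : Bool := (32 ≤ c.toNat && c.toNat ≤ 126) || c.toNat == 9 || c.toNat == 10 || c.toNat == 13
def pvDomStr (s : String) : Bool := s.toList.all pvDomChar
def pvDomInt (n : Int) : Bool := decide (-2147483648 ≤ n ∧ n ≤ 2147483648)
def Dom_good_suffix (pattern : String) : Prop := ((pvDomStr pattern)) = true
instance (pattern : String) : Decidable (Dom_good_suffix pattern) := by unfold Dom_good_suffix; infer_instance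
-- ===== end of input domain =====

-- B replaces A's Z-algorithm preprocessing by a direct per-position suffix-match scan:
-- simpler (no helper passes, no reversals), at the cost of a quadratic instead of linear bound.

-- ===== PORT A =====

-- while r < n and string[r - l] == string[r]: r += 1   (returns the final r)
def zGrow (s : List Char) (l r : Nat) : Nat :=
  if _h : r < s.length then
    if s.getD (r - l) ' ' = s.getD r ' ' then zGrow s l (r + 1) else r
  else r
termination_by s.length - r

-- one iteration of z_algo's main for-loop, state (z_arr, l, r)
def zStep (s : List Char) (st : List Nat × Nat × Nat) (i : Nat) : List Nat × Nat × Nat :=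
  match st with
  | (z, l, r) =>
    if r < i then                         -- CASE 1: i > r
      let r' := zGrow s i i
      (z.set i (r' - i), i, r' - 1)
    else
      let k := i - l
      let rem := r - i + 1
      if z.getD k 0 < rem then            -- CASE 2a
        (z.set i (z.getD k 0), l, r)
      else if rem < z.getD k 0 then       -- CASE 2b
        (z.set i rem, l, r)
      else                                -- CASE 2c
        let r' := zGrow s i r
        (z.set i (r' - i), i, r' - 1)

-- z_algo (values as Nat; the assert picks no value, Pre_ excludes the empty string)
def zArr (s : List Char) : List Nat :=
  (List.range' 1 (s.length - 1)).foldl (zStep s) ((List.replicate s.length 0).set 0 s.length, 0, 0) |>.1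

def good_suffix (pattern : String) : List (List Int) :=
  let s := pattern.toList
  let m := s.length
  let rz := (zArr s.reverse).reverse        -- get_reversed_z_arr
  let filled := (List.range (m - 1)).reverse.foldl
      (fun arr p => arr.modify (m - rz.getD p 0) (fun b => b ++ [(p : Int) + 1]))
      (List.replicate (m + 1) ([] : List Int))
  filled.map (fun b => if b = [] then [0] else b)

-- ===== PORT B =====

-- L = 0; while L <= p and pattern[m-1-L] == pattern[p-L]: L += 1   (returns the final L)
def sufGrow (s : List Char) (p L : Nat) : Nat :=
  if L ≤ p then
    if s.getD (s.length - 1 - L) ' ' = s.getD (p - L) ' ' then sufGrow s p (L + 1) else L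
  else L
termination_by p + 1 - L

def good_suffix_alt (pattern : String) : List (List Int) :=
  let s := pattern.toList
  let m := s.length
  let filled := (List.range (m - 1)).reverse.foldl
      (fun arr p => arr.modify (m - sufGrow s p 0) (fun b => b ++ [(p : Int) + 1]))
      (List.replicate (m + 1) ([] : List Int))
  filled.map (fun b => if b = [] then [0] else b)

-- ===== PRECONDITION & SPEC =====
-- Python A raises AssertionError on the empty pattern (z_algo asserts a non-empty string).
def Pre_good_suffix (pattern : String) : Prop := pattern ≠ ""
instance (pattern : String) : Decidable (Pre_good_suffix pattern) := by unfold Pre_good_suffix; infer_instance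
def pvWitness_good_suffix : String := "acababacaba"

def Spec_good_suffix (pattern : String) (out : List (List Int)) : Prop := out = good_suffix_alt pattern
instance (pattern : String) (out : List (List Int)) : Decidable (Spec_good_suffix pattern out) := by unfold Spec_good_suffix; infer_instance

-- ===== CLAIM (what is proved, stated in full; the proofs are below) =====
def Claim_equal_good_suffix : Prop := ∀ (pattern : String), Dom_good_suffix pattern → Pre_good_suffix pattern → Spec_good_suffix pattern (good_suffix pattern)

-- ===== LEMMAS AND PROOFS =====

-- length of the longest common prefix of two character lists
def pvLcp : List Char → List Char → Nat
  | a :: as, b :: bs => if a = b then pvLcp as bs + 1 else 0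
  | _, _ => 0

theorem pvLcp_le_right : ∀ (a b : List Char), pvLcp a b ≤ b.length := by
  intro a; induction a with
  | nil => intro b; cases b <;> simp [pvLcp]
  | cons x as ih => intro b; cases b with
    | nil => simp [pvLcp]
    | cons y bs =>
      by_cases h : x = y
      · subst h; simpa [pvLcp] using ih bs
      · simp [pvLcp, h]

theorem pvLcp_self : ∀ (a : List Char), pvLcp a a = a.length := by
  intro a; induction a with
  | nil => simp [pvLcp]
  | cons x as ih => simp [pvLcp, ih]

theorem pvLcp_getD : ∀ (a b : List Char) (j : Nat), j < pvLcp a b → a.getD j ' ' = b.getD j ' ' := by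
  intro a; induction a with
  | nil => intro b j h; cases b <;> simp [pvLcp] at h
  | cons x as ih =>
    intro b j h; cases b with
    | nil => simp [pvLcp] at h
    | cons y bs =>
      by_cases hxy : x = y
      · subst hxy
        cases j with
        | zero => simp
        | succ j =>
          simp [pvLcp] at h
          simpa using ih bs j (by omega)
      · simp [pvLcp, hxy] at h

theorem pvLcp_stop : ∀ (a b : List Char), pvLcp a b < a.length → pvLcp a b < b.length →
    a.getD (pvLcp a b) ' ' ≠ b.getD (pvLcp a b) ' ' := by
  intro a; induction a with
  | nil => intro b h1 _; simp at h1
  | cons x as ih =>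
    intro b h1 h2; cases b with
    | nil => simp at h2
    | cons y bs =>
      by_cases hxy : x = y
      · subst hxy
        simp [pvLcp] at h1 h2 ⊢
        simpa using ih bs (by simpa using h1) (by simpa using h2)
      · simpa [pvLcp, hxy] using hxy

theorem pvLcp_ge : ∀ (a b : List Char) (k : Nat), k ≤ a.length → k ≤ b.length →
    (∀ j < k, a.getD j ' ' = b.getD j ' ') → k ≤ pvLcp a b := by
  intro a; induction a with
  | nil => intro b k h1 _ _; simp at h1; omega
  | cons x as ih =>
    intro b k h1 h2 h3; cases b with
    | nil => simp at h2; omega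
    | cons y bs =>
      cases k with
      | zero => omega
      | succ k =>
        have hxy : x = y := by simpa using h3 0 (by omega)
        subst hxy
        simp [pvLcp]
        have := ih bs k (by simpa using h1) (by simpa using h2)
          (fun j hj => by simpa using h3 (j+1) (by omega))
        omega

theorem getD_drop (l : List Char) (i j : Nat) (d : Char) : (l.drop i).getD j d = l.getD (i + j) d := by
  simp [List.getD_eq_getElem?_getD, List.getElem?_drop]

theorem getD_reverse {α : Type} [Inhabited α] (l : List α) (j : Nat) (d : α) (h : j < l.length) :
    (l.reverse).getD j d = l.getD (l.length - 1 - j) d := by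
  simp [List.getD_eq_getElem?_getD, h]
  rw [List.getElem?_eq_getElem (by omega)]
  simp

theorem getD_set_ne {α : Type} (l : List α) (i j : Nat) (v d : α) (h : i ≠ j) :
    (l.set i v).getD j d = l.getD j d := by
  simp [List.getD_eq_getElem?_getD, List.getElem?_set_ne h]

theorem getD_set_self {α : Type} (l : List α) (i : Nat) (v d : α) (h : i < l.length) :
    (l.set i v).getD i d = v := by
  simp [List.getD_eq_getElem?_getD, h]

theorem zGrow_eq : ∀ (k : Nat) (s : List Char) (l r : Nat), s.length - r ≤ k → l ≤ r →
    r - l ≤ pvLcp s (s.drop l) → zGrow s l r = l + pvLcp s (s.drop l) := by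
  intro k
  induction k with
  | zero =>
    intro s l r hk hlr hm
    have hZ := pvLcp_le_right s (s.drop l)
    simp at hZ
    rw [zGrow]
    rw [dif_neg (by omega)]
    omega
  | succ k ih =>
    intro s l r hk hlr hm
    rw [zGrow]
    by_cases hr : r < s.length
    · rw [dif_pos hr]
      have hZr := pvLcp_le_right s (s.drop l)
      simp at hZr
      by_cases hc : s.getD (r - l) ' ' = s.getD r ' '
      · rw [if_pos hc]
        -- condition holds, so the match extends: r - l < pvLcp
        have hlt : r - l < pvLcp s (s.drop l) := by
          rcases Nat.lt_or_ge (r - l) (pvLcp s (s.drop l)) with h | h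
          · exact h
          · exfalso
            have heq : r - l = pvLcp s (s.drop l) := by omega
            have := pvLcp_stop s (s.drop l) (by omega) (by simp; omega)
            rw [← heq] at this
            rw [getD_drop] at this
            have : s.getD (r - l) ' ' ≠ s.getD r ' ' := by
              have h2 : l + (r - l) = r := by omega
              rwa [h2] at this
            exact this hc
        exact ih s l (r+1) (by omega) (by omega) (by omega)
      · rw [if_neg hc]
        -- mismatch: the lcp stops exactly here
        have : ¬ (r - l < pvLcp s (s.drop l)) := by
          intro h
          have := pvLcp_getD s (s.drop l) (r - l) h
          rw [getD_drop] at this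
          have h2 : l + (r - l) = r := by omega
          rw [h2] at this
          exact hc this
        omega
    · rw [dif_neg hr]
      have hZ := pvLcp_le_right s (s.drop l)
      simp at hZ
      omega
theorem sufGrow_aux : ∀ (k : Nat) (s : List Char) (p L : Nat), p + 1 < s.length →
    p + 1 - L ≤ k → L ≤ pvLcp s.reverse (s.reverse.drop (s.length - 1 - p)) →
    sufGrow s p L = pvLcp s.reverse (s.reverse.drop (s.length - 1 - p)) := by
  intro k
  induction k with
  | zero =>
    intro s p L hp hk hL
    have hle := pvLcp_le_right s.reverse (s.reverse.drop (s.length - 1 - p))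
    simp at hle
    rw [sufGrow]
    rw [if_neg (by omega)]
    omega
  | succ k ih =>
    intro s p L hp hk hL
    have hle := pvLcp_le_right s.reverse (s.reverse.drop (s.length - 1 - p))
    simp at hle
    rw [sufGrow]
    by_cases hLp : L ≤ p
    · rw [if_pos hLp]
      -- translate the two indexed characters
      have ht : s.reverse.getD L ' ' = s.getD (s.length - 1 - L) ' ' := by
        rw [getD_reverse _ _ _ (by omega)]
      have hu : (s.reverse.drop (s.length - 1 - p)).getD L ' ' = s.getD (p - L) ' ' := by
        rw [getD_drop, getD_reverse _ _ _ (by omega)]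
        congr 1
        omega
      by_cases hch : s.getD (s.length - 1 - L) ' ' = s.getD (p - L) ' '
      · rw [if_pos hch]
        have hlt : L < pvLcp s.reverse (s.reverse.drop (s.length - 1 - p)) := by
          rcases Nat.lt_or_ge L (pvLcp s.reverse (s.reverse.drop (s.length - 1 - p))) with h | h
          · exact h
          · exfalso
            have hstop := pvLcp_stop s.reverse (s.reverse.drop (s.length - 1 - p))
              (by simp; omega) (by simp; omega)
            have heq : pvLcp s.reverse (s.reverse.drop (s.length - 1 - p)) = L := by omega
            rw [heq, ht, hu] at hstop
            exact hstop hch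
        exact ih s p (L+1) hp (by omega) (by omega)
      · rw [if_neg hch]
        have : ¬ (L < pvLcp s.reverse (s.reverse.drop (s.length - 1 - p))) := by
          intro h
          have := pvLcp_getD _ _ L h
          rw [ht, hu] at this
          exact hch this
        omega
    · rw [if_neg hLp]
      omega

theorem sufGrow_eq (s : List Char) (p : Nat) (hp : p + 1 < s.length) :
    sufGrow s p 0 = pvLcp s.reverse (s.reverse.drop (s.length - 1 - p)) := by
  exact sufGrow_aux (p+1) s p 0 hp (by omega) (by omega)
def ZInv (t : List Char) (i : Nat) : (List Nat × Nat × Nat) → Prop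
  | (z, l, r) =>
      z.length = t.length ∧
      (∀ j < i, z.getD j 0 = pvLcp t (t.drop j)) ∧
      l < i ∧ (l = 0 → r = 0) ∧
      r + 1 ≤ l + pvLcp t (t.drop l) ∧
      (r + 1 = t.length ∨ r + 1 = l + pvLcp t (t.drop l) ∨ r < i)

theorem zInv_post (t : List Char) (i : Nat) (hi : 1 ≤ i) (hin : i < t.length)
    (z : List Nat) (hlen : z.length = t.length)
    (hz : ∀ j < i, z.getD j 0 = pvLcp t (t.drop j)) :
    ZInv t (i+1) (z.set i (pvLcp t (t.drop i)), i, i + pvLcp t (t.drop i) - 1) := by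
  have hZi_le : pvLcp t (t.drop i) ≤ t.length - i := by
    have := pvLcp_le_right t (t.drop i); simpa using this
  refine ⟨by simpa using hlen, ?_, by omega, by omega, by omega, ?_⟩
  · intro j hj
    rcases Nat.lt_or_ge j i with h | h
    · rw [getD_set_ne _ _ _ _ _ (by omega)]; exact hz j h
    · have : j = i := by omega
      subst this
      rw [getD_set_self _ _ _ _ (by omega)]
  · right; left; omega

theorem zStep_inv (t : List Char) (i : Nat) (hi : 1 ≤ i) (hin : i < t.length)
    (st : List Nat × Nat × Nat) (h : ZInv t i st) : ZInv t (i + 1) (zStep t st i) := by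
  obtain ⟨z, l, r⟩ := st
  obtain ⟨hlen, hz, hli, hl0, hbox, hmax⟩ := h
  have hZl_le : pvLcp t (t.drop l) ≤ t.length - l := by
    have := pvLcp_le_right t (t.drop l); simpa using this
  have hZi_le : pvLcp t (t.drop i) ≤ t.length - i := by
    have := pvLcp_le_right t (t.drop i); simpa using this
  by_cases hri : r < i
  · -- CASE 1
    have hg : zGrow t i i = i + pvLcp t (t.drop i) :=
      zGrow_eq t.length t i i (by omega) le_rfl (by omega)
    have hv : zGrow t i i - i = pvLcp t (t.drop i) := by omega
    simp only [zStep, if_pos hri, hv, hg]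
    rw [Nat.add_sub_cancel_left]; exact zInv_post t i hi hin z hlen hz
  · -- CASE 2
    have hil : i ≤ r := by omega
    have hl1 : 1 ≤ l := by
      rcases Nat.eq_zero_or_pos l with h0 | h0
      · have := hl0 h0; omega
      · exact h0
    have hrn : r + 1 ≤ t.length := by omega
    have hzk : z.getD (i - l) 0 = pvLcp t (t.drop (i - l)) := hz _ (by omega)
    have hZk_le : pvLcp t (t.drop (i - l)) ≤ t.length - (i - l) := by
      have := pvLcp_le_right t (t.drop (i - l)); simpa using this
    have boxmatch : ∀ j, j < r + 1 - l → t.getD j ' ' = t.getD (l + j) ' ' := by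
      intro j hj
      have := pvLcp_getD t (t.drop l) j (by omega)
      rwa [getD_drop] at this
    rcases Nat.lt_trichotomy (pvLcp t (t.drop (i - l))) (r - i + 1) with hcmp | hcmp | hcmp
    · -- CASE 2a : Z i = Z k
      have hge : pvLcp t (t.drop (i - l)) ≤ pvLcp t (t.drop i) := by
        apply pvLcp_ge
        · omega
        · simp; omega
        · intro j hj
          rw [getD_drop]
          have h1 : t.getD j ' ' = t.getD ((i - l) + j) ' ' := by
            have := pvLcp_getD t (t.drop (i - l)) j (by omega)
            rwa [getD_drop] at this
          have h2 : t.getD ((i - l) + j) ' ' = t.getD (l + ((i - l) + j)) ' ' :=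
            boxmatch _ (by omega)
          rw [h1, h2]
          congr 1
          omega
      have hle2 : pvLcp t (t.drop i) ≤ pvLcp t (t.drop (i - l)) := by
        by_contra hcon
        push_neg at hcon
        have hmm := pvLcp_stop t (t.drop (i - l)) (by omega) (by simp; omega)
        have h1 : t.getD (pvLcp t (t.drop (i - l))) ' ' =
            t.getD (i + pvLcp t (t.drop (i - l))) ' ' := by
          have := pvLcp_getD t (t.drop i) _ hcon
          rwa [getD_drop] at this
        have h2 : t.getD ((i - l) + pvLcp t (t.drop (i - l))) ' ' =
            t.getD (i + pvLcp t (t.drop (i - l))) ' ' := by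
          have := boxmatch ((i - l) + pvLcp t (t.drop (i - l))) (by omega)
          rw [this]
          congr 1
          omega
        rw [getD_drop] at hmm
        exact hmm (by rw [h1, ← h2])
      have hZiZk : pvLcp t (t.drop i) = pvLcp t (t.drop (i - l)) := le_antisymm hle2 hge
      simp only [zStep, if_neg hri, hzk, if_pos hcmp]
      refine ⟨by simpa using hlen, ?_, by omega, hl0, hbox, ?_⟩
      · intro j hj
        rcases Nat.lt_or_ge j i with h | h
        · rw [getD_set_ne _ _ _ _ _ (by omega)]; exact hz j h
        · have : j = i := by omega
          subst this
          rw [getD_set_self _ _ _ _ (by omega), hZiZk]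
      · rcases hmax with h | h | h
        · exact Or.inl h
        · exact Or.inr (Or.inl h)
        · omega
    · -- CASE 2c : Z k = rem, grow again from r with l := i
      have hge : r - i + 1 ≤ pvLcp t (t.drop i) := by
        apply pvLcp_ge
        · omega
        · simp; omega
        · intro j hj
          rw [getD_drop]
          have h1 : t.getD j ' ' = t.getD ((i - l) + j) ' ' := by
            have := pvLcp_getD t (t.drop (i - l)) j (by omega)
            rwa [getD_drop] at this
          have h2 : t.getD ((i - l) + j) ' ' = t.getD (l + ((i - l) + j)) ' ' :=
            boxmatch _ (by omega)
          rw [h1, h2]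
          congr 1
          omega
      have hg : zGrow t i r = i + pvLcp t (t.drop i) :=
        zGrow_eq t.length t i r (by omega) hil (by omega)
      have hv : zGrow t i r - i = pvLcp t (t.drop i) := by omega
      simp only [zStep, if_neg hri, hzk, if_neg (by omega : ¬ pvLcp t (t.drop (i-l)) < r - i + 1),
        if_neg (by omega : ¬ r - i + 1 < pvLcp t (t.drop (i-l))), hv, hg]
      rw [Nat.add_sub_cancel_left]; exact zInv_post t i hi hin z hlen hz
    · -- CASE 2b : Z i = rem
      have hge : r - i + 1 ≤ pvLcp t (t.drop i) := by
        apply pvLcp_ge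
        · omega
        · simp; omega
        · intro j hj
          rw [getD_drop]
          have h1 : t.getD j ' ' = t.getD ((i - l) + j) ' ' := by
            have := pvLcp_getD t (t.drop (i - l)) j (by omega)
            rwa [getD_drop] at this
          have h2 : t.getD ((i - l) + j) ' ' = t.getD (l + ((i - l) + j)) ' ' :=
            boxmatch _ (by omega)
          rw [h1, h2]
          congr 1
          omega
      have hle2 : pvLcp t (t.drop i) ≤ r - i + 1 := by
        rcases Nat.eq_or_lt_of_le hrn with hn | hn
        · omega
        · have hmaxeq : r + 1 = l + pvLcp t (t.drop l) := by
            rcases hmax with h | h | h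
            · omega
            · exact h
            · omega
          have hmm := pvLcp_stop t (t.drop l) (by omega) (by simp; omega)
          rw [getD_drop] at hmm
          by_contra hcon
          push_neg at hcon
          have h1 : t.getD (r - i + 1) ' ' = t.getD (r + 1) ' ' := by
            have := pvLcp_getD t (t.drop i) _ hcon
            rw [getD_drop] at this
            rw [this]
            congr 1
            omega
          have h2 : t.getD (r - i + 1) ' ' = t.getD (pvLcp t (t.drop l)) ' ' := by
            have := pvLcp_getD t (t.drop (i - l)) (r - i + 1) (by omega)
            rw [getD_drop] at this
            rw [this]
            congr 1
            omega
          have h3 : l + pvLcp t (t.drop l) = r + 1 := hmaxeq.symm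
          rw [h3] at hmm
          exact hmm (by rw [← h2, h1])
      have hZirem : pvLcp t (t.drop i) = r - i + 1 := le_antisymm hle2 hge
      simp only [zStep, if_neg hri, hzk, if_neg (by omega : ¬ pvLcp t (t.drop (i-l)) < r - i + 1),
        if_pos hcmp]
      refine ⟨by simpa using hlen, ?_, by omega, hl0, hbox, ?_⟩
      · intro j hj
        rcases Nat.lt_or_ge j i with h | h
        · rw [getD_set_ne _ _ _ _ _ (by omega)]; exact hz j h
        · have : j = i := by omega
          subst this
          rw [getD_set_self _ _ _ _ (by omega), hZirem]
      · rcases hmax with h | h | h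
        · exact Or.inl h
        · exact Or.inr (Or.inl h)
        · omega
theorem zFold_inv (t : List Char) : ∀ (cnt i : Nat) (st : List Nat × Nat × Nat), 1 ≤ i →
    i + cnt ≤ t.length → ZInv t i st →
    ZInv t (i + cnt) (List.foldl (zStep t) st (List.range' i cnt)) := by
  intro cnt
  induction cnt with
  | zero => intro i st _ _ h; simpa using h
  | succ c ih =>
    intro i st hi hle h
    rw [List.range'_succ, List.foldl_cons]
    have := ih (i+1) (zStep t st i) (by omega) (by omega) (zStep_inv t i hi (by omega) st h)
    rw [show i + (c+1) = i + 1 + c from by omega]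
    exact this

theorem zArr_spec (t : List Char) (ht : t ≠ []) :
    (zArr t).length = t.length ∧ ∀ j < t.length, (zArr t).getD j 0 = pvLcp t (t.drop j) := by
  have hn : 1 ≤ t.length := by
    have : t.length ≠ 0 := by simpa [List.length_eq_zero_iff] using ht
    omega
  have h0 : ZInv t 1 ((List.replicate t.length 0).set 0 t.length, 0, 0) := by
    refine ⟨by simp, ?_, by omega, fun _ => rfl, ?_, by omega⟩
    · intro j hj
      have hj0 : j = 0 := by omega
      subst hj0
      rw [getD_set_self _ _ _ _ (by simp; omega)]
      simp [pvLcp_self]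
    · simp [pvLcp_self]; omega
  have hfin := zFold_inv t (t.length - 1) 1 _ le_rfl (by omega) h0
  rw [show 1 + (t.length - 1) = t.length from by omega] at hfin
  rcases hst : List.foldl (zStep t) ((List.replicate t.length 0).set 0 t.length, 0, 0)
      (List.range' 1 (t.length - 1)) with ⟨z, l, r⟩
  rw [hst] at hfin
  obtain ⟨hlen, hz, -⟩ := hfin
  have hzarr : zArr t = z := by unfold zArr; rw [hst]
  rw [hzarr]
  exact ⟨hlen, hz⟩

theorem rz_val (s : List Char) (p : Nat) (hp : p + 1 < s.length) :
    ((zArr s.reverse).reverse).getD p 0 = sufGrow s p 0 := by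
  have hrev : s.reverse ≠ [] := by
    intro h
    have : s.reverse.length = 0 := by rw [h]; rfl
    rw [List.length_reverse] at this
    omega
  obtain ⟨hlen, hall⟩ := zArr_spec s.reverse hrev
  have hlenr : (zArr s.reverse).length = s.length := by simpa using hlen
  rw [getD_reverse (zArr s.reverse) p 0 (by omega), hlenr,
    hall (s.length - 1 - p) (by simp; omega), sufGrow_eq s p hp]

theorem ports_eq (pattern : String) : good_suffix pattern = good_suffix_alt pattern := by
  unfold good_suffix good_suffix_alt
  dsimp only
  congr 1
  apply List.foldl_ext
  intro arr p hp
  rw [List.mem_reverse, List.mem_range] at hp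
  rw [rz_val pattern.toList p (by omega)]

-- ===== VERDICT (by name: the statement is the Claim_ definition above) =====
theorem good_suffix_spec : Claim_equal_good_suffix := by
  intro pattern _ _
  unfold Spec_good_suffix
  exact ports_eq pattern
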